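-- pv_equiv track=rewrite | github.com/JowettC/cor1702-rekt | Lab3/lab3b.py | to_binary_old
-- ===== SOURCE A (Python) =====
-- def to_binary_old(d):
--     # Base-10 -> 0 1 2 3 4 5 6 7 8 9
--     # Base-2 -> 0 1
--     # 6 => 110
--     bin_res = ["0", "0", "0", "0"]
--     cur_val = d % 10
--     if cur_val // 2 ** 3 > 0:
--         bin_res[0] = "1"
--         cur_val -= 2 ** 3
--     if cur_val // 2 ** 2 > 0:
--         bin_res[1] = "1"
--         cur_val -= 2 ** 2
--     if cur_val // 2 ** 1 > 0:
--         bin_res[2] = "1"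
--         cur_val -= 2 ** 1
--     if cur_val // 2 ** 0 > 0:
--         bin_res[3] = "1"
--         cur_val -= 2 ** 0
--
--     return "".join(bin_res) if d // 10 == 0 else to_binary_old(d // 10) + "".join(bin_res)
-- ===== SOURCE B (Python) =====
-- def to_binary_old(d):
--     # Iterative BCD: peel decimal digits least-significant first and prepend
--     # each 4-bit block; a post-test loop emits at least one block.
--     blocks = []
--     while True:
--         cur = d % 10
--         bits = ""
--         for p in (8, 4, 2, 1):
--             if cur >= p:
--                 bits += "1"
--                 cur -= p
--             else:
--                 bits += "0"
--         blocks = [bits] + blocks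
--         d //= 10
--         if d == 0:
--             break
--     return "".join(blocks)
-- ===== Notes on version B (the rewrite author's own statement) =====
-- stated objective: simpler
-- what changed: Replaces A's recursion and its four hard-coded list-mutation branches with a post-test loop that peels digits with %10 and //10, builds each 4-bit block by folding over the powers (8,4,2,1), prepends blocks and joins them once.
import Mathlib
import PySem

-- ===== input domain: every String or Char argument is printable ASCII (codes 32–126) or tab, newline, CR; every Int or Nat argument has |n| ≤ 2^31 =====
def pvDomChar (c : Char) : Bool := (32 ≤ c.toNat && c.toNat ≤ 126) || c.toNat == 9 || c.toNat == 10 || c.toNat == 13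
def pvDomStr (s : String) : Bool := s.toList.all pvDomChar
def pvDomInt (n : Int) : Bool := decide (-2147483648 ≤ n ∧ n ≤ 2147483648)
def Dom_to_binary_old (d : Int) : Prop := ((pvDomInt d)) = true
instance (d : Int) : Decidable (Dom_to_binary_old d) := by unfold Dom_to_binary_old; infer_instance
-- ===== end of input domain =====

-- B drops A's recursion for a post-test digit loop (prepend 4-bit blocks, join once); objective: simpler.
-- Both programs fail to return on d < 0 (A by RecursionError, B by an endless loop); Pre_ excludes d < 0.

-- ===== PORT A =====
-- one recursion level of A: bin_res/cur_val ladder then "".join(bin_res)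
def pvDigitA (d : Int) : String :=
  let binRes : List String := ["0", "0", "0", "0"]
  let curVal := PySem.Int.mod d 10
  let (binRes, curVal) :=
    if PySem.Int.floordiv curVal (2 ^ 3) > 0 then (binRes.set 0 "1", curVal - 2 ^ 3) else (binRes, curVal)
  let (binRes, curVal) :=
    if PySem.Int.floordiv curVal (2 ^ 2) > 0 then (binRes.set 1 "1", curVal - 2 ^ 2) else (binRes, curVal)
  let (binRes, curVal) :=
    if PySem.Int.floordiv curVal (2 ^ 1) > 0 then (binRes.set 2 "1", curVal - 2 ^ 1) else (binRes, curVal)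
  let (binRes, _) :=
    if PySem.Int.floordiv curVal (2 ^ 0) > 0 then (binRes.set 3 "1", curVal - 2 ^ 0) else (binRes, curVal)
  PySem.Str.join "" binRes

-- A's recursion, made total with fuel (d.toNat + 1 suffices for every d ≥ 0, i.e. on Pre_)
def pvGoA : Nat → Int → String
  | 0, _ => ""
  | fuel + 1, d =>
      if PySem.Int.floordiv d 10 = 0 then pvDigitA d
      else pvGoA fuel (PySem.Int.floordiv d 10) ++ pvDigitA d

def to_binary_old (d : Int) : String := pvGoA (d.toNat + 1) d

-- ===== PORT B =====
-- the inner for-loop of Source B: fold (bits, cur) over the powers (8, 4, 2, 1)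
def pvDigitB (cur : Int) : String :=
  (([8, 4, 2, 1] : List Int).foldl
    (fun (st : String × Int) p =>
      if st.2 ≥ p then (st.1 ++ "1", st.2 - p) else (st.1 ++ "0", st.2))
    ("", cur)).1

-- Source B's while loop; runs on d.toNat (= d for every d ≥ 0, i.e. on Pre_; B loops forever on d < 0)
def pvLoopB (n : Nat) (blocks : List String) : List String :=
  let blocks' := pvDigitB ((n % 10 : Nat) : Int) :: blocks
  let n' := n / 10
  if _h : n' = 0 then blocks' else pvLoopB n' blocks'
termination_by n
decreasing_by omega

def to_binary_old_alt (d : Int) : String := PySem.Str.join "" (pvLoopB d.toNat [])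

-- ===== PRECONDITION & SPEC =====
-- A recurses on d // 10, which never reaches 0 from a negative d: A raises RecursionError for d < 0.
def Pre_to_binary_old (d : Int) : Prop := 0 ≤ d
instance (d : Int) : Decidable (Pre_to_binary_old d) := by unfold Pre_to_binary_old; infer_instance
def pvWitness_to_binary_old : Int := (42)

def Spec_to_binary_old (d : Int) (out : String) : Prop := out = to_binary_old_alt d
instance (d : Int) (out : String) : Decidable (Spec_to_binary_old d out) := by unfold Spec_to_binary_old; infer_instance

-- ===== CLAIM (what is proved, stated in full; the proofs are below) =====
def Claim_equal_to_binary_old : Prop := ∀ (d : Int), Dom_to_binary_old d → Pre_to_binary_old d → Spec_to_binary_old d (to_binary_old d)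

-- ===== LEMMAS AND PROOFS =====

lemma pv_chars_join_cons (x : List Char) (xs : List (List Char)) :
    PySem.Chars.join [] (x :: xs) = x ++ PySem.Chars.join [] xs := by
  cases xs with
  | nil => simp [PySem.Chars.join, List.intercalate]
  | cons y ys => rw [PySem.Chars.join_cons_cons]; simp

lemma pv_join_cons (x : String) (xs : List String) :
    PySem.Str.join "" (x :: xs) = x ++ PySem.Str.join "" xs := by
  simp [PySem.Str.join, pv_chars_join_cons]

lemma pv_mod_cast (n : Nat) : PySem.Int.mod (n : Int) 10 = ((n % 10 : Nat) : Int) := by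
  rw [PySem.Int.mod_eq_emod_of_pos (by norm_num)]; exact (Nat.ToInt.mod_congr rfl rfl).symm

lemma pv_floordiv_cast (n : Nat) : PySem.Int.floordiv (n : Int) 10 = ((n / 10 : Nat) : Int) := by
  rw [PySem.Int.floordiv_eq_ediv_of_pos (by norm_num)]; exact (Nat.ToInt.div_congr rfl rfl).symm

-- the two digit-to-bits computations agree on every decimal digit
lemma pv_digit_small : ∀ c : Nat, c < 10 → pvDigitA (c : Int) = pvDigitB (c : Int) := by decide

lemma pv_digit_eq (n : Nat) : pvDigitA (n : Int) = pvDigitB ((n % 10 : Nat) : Int) := by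
  have h1 : pvDigitA (n : Int) = pvDigitA ((n % 10 : Nat) : Int) := by
    simp only [pvDigitA, pv_mod_cast, Nat.mod_mod]
  rw [h1, pv_digit_small (n % 10) (Nat.mod_lt n (by norm_num))]

-- main invariant: A's recursion with enough fuel, appended to the joined accumulator,
-- equals B's loop result joined
lemma pv_main (n : Nat) : ∀ fuel, n < fuel → ∀ acc : List String,
    pvGoA fuel (n : Int) ++ PySem.Str.join "" acc = PySem.Str.join "" (pvLoopB n acc) := by
  induction n using Nat.strong_induction_on with
  | _ n ih =>
    intro fuel hf acc
    match fuel, hf with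
    | fuel + 1, hf =>
      rw [pvLoopB]
      simp only [pvGoA, pv_floordiv_cast]
      by_cases h : n / 10 = 0
      · simp only [h, Nat.cast_zero, if_true, reduceDIte, pv_join_cons, pv_digit_eq]
      · have hcast : ((n / 10 : Nat) : Int) ≠ 0 := by exact_mod_cast h
        simp only [h, hcast, if_neg, reduceDIte, reduceIte]
        rw [← ih (n / 10) (by omega) fuel (by omega) (pvDigitB ((n % 10 : Nat) : Int) :: acc)]
        rw [pv_join_cons, pv_digit_eq, String.append_assoc]

-- ===== VERDICT (by name: the statement is the Claim_ definition above) =====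
theorem to_binary_old_spec : Claim_equal_to_binary_old := by
  intro d _ hpre
  unfold Spec_to_binary_old to_binary_old to_binary_old_alt
  obtain ⟨n, rfl⟩ : ∃ n : Nat, d = (n : Int) := ⟨d.toNat, (Int.toNat_of_nonneg hpre).symm⟩
  have h := pv_main n (n + 1) (by omega) []
  simpa [PySem.Str.join, PySem.Chars.join, List.intercalate] using h
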